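-- pv_equiv track=rewrite | github.com/minji-o-j/Python | 프로그래머스/억억단을 외우자.py | solution
-- ===== SOURCE A (Python) =====
-- def solution(e, starts):
--     # 약수 개수 = 억억단 등장 개수
--     min_s = min(starts)
--     d = [0 for i in range(e+1)] #약수 -- index e번 까지 저장
--     for i in range(1, e+1): # 최소 s부터 e까지
--         # 직접 약수가 되어서 개수를 센다
--         if i*i <= e:
--             d[i*i] += 1
--         for j in range(i+1, e+1):
--             ij = i*j
--             if ij > e:
--                 break
--             d[ij] += 2
--
--     max_div_list = [0 for i in range(e+1)] # 특정 구간 내에 가장 많이 등장한 수 찾기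
--     max_div_list[-1] = e
--
--     for i in range(e-1, min_s-1, -1) :
--         if d[max_div_list[i+1]] <= d[i] : # 현재 숫자의 약수 개수가 더 많은 경우
--             max_div_list[i] = i
--         else :
--             max_div_list[i] = max_div_list[i+1]
--
--     answer = [max_div_list[s] for s in starts]
--     return answer
-- ===== SOURCE B (Python) =====
-- def solution(e, starts):
--     # phase 1 replaced: standard divisor sieve (per-divisor multiples) instead of
--     # ordered factor-pair enumeration; phase 2 (suffix sweep) kept as in A.
--     min_s = min(starts)
--     d = [0] * (e + 1)
--     for dv in range(1, e + 1):
--         for m in range(dv, e + 1, dv):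
--             d[m] += 1
--     max_div_list = [0] * (e + 1)
--     max_div_list[-1] = e
--     for i in range(e - 1, min_s - 1, -1):
--         if d[max_div_list[i + 1]] <= d[i]:
--             max_div_list[i] = i
--         else:
--             max_div_list[i] = max_div_list[i + 1]
--     return [max_div_list[s] for s in starts]
-- ===== Notes on version B (the rewrite author's own statement) =====
-- stated objective: alternative
-- what changed: Phase 1's ordered factor-pair enumeration (outer i with a square bump, inner j with a break) is replaced by the standard divisor sieve (for each dv, add 1 at every multiple of dv); the suffix-max sweep and answer lookup are unchanged.
import Mathlib
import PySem

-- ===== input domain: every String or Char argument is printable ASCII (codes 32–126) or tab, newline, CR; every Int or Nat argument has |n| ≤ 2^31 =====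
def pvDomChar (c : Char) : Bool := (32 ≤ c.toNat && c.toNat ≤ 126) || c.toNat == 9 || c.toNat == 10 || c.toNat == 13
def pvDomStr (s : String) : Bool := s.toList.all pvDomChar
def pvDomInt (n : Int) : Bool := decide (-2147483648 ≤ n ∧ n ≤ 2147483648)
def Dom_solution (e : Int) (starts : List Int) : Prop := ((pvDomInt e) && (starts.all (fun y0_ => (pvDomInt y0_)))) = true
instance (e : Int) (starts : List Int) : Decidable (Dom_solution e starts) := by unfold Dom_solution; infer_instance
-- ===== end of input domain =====

-- B replaces A's ordered factor-pair enumeration (with break) by a per-divisor multiples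
-- sieve for the divisor-count table; the suffix sweep and answer lookup are unchanged.

-- ===== PORT A =====
-- Python-exact list indexing on arrays (same wrap/raise rule as PySem.List.pyGetD/pySetD,
-- proved by aGetD_toList/aSetD_toList below); arrays keep evaluation fast
def aGetD (a : Array Int) (i : Int) (d : Int) : Int :=
  match PySem.List.pyIdx? a.size i with
  | some k => (a[k]?).getD d
  | none => d

def aSetD (a : Array Int) (i : Int) (v : Int) : Array Int :=
  match PySem.List.pyIdx? a.size i with
  | some k => a.setIfInBounds k v
  | none => a

-- inner 'for j in range(i+1, e+1): ij = i*j; if ij > e: break; d[ij] += 2'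
-- (counter recursion transcribes the lazy range with break; indices are in range on
-- every executed update)
def solutionInner (e i : Int) (d : Array Int) (j : Int) : Array Int :=
  if h : j < e + 1 then
    let ij := i * j
    if ij > e then d
    else solutionInner e i (aSetD d ij (aGetD d ij 0 + 2)) (j + 1)
  else d
termination_by (e + 1 - j).toNat
decreasing_by omega

-- d = [0 for i in range(e+1)]; the double loop counting divisor pairs
def solutionPhase1A (e : Int) : Array Int :=
  (PySem.List.pyRange 1 (e+1) 1).foldl
    (fun d i =>
      let d' := if i*i ≤ e then aSetD d (i*i) (aGetD d (i*i) 0 + 1) else d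
      solutionInner e i d' (i+1))
    ((PySem.List.pyRange 0 (e+1) 1).map (fun _ => 0)).toArray

-- max_div_list = [0 for i in range(e+1)]; max_div_list[-1] = e; backward sweep
def solutionSuffixA (e min_s : Int) (d : Array Int) : Array Int :=
  (PySem.List.pyRange (e-1) (min_s-1) (-1)).foldl
    (fun m i =>
      if aGetD d (aGetD m (i+1) 0) 0 ≤ aGetD d i 0
      then aSetD m i i
      else aSetD m i (aGetD m (i+1) 0))
    (aSetD ((PySem.List.pyRange 0 (e+1) 1).map (fun _ => 0)).toArray (-1) e)

def solution (e : Int) (starts : List Int) : List Int :=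
  match PySem.List.min? starts (fun x => x) with
  | none => []   -- min() raises ValueError on empty starts; excluded by Pre_
  | some min_s =>
    let d := solutionPhase1A e
    let mdl := solutionSuffixA e min_s d
    starts.map (fun s => aGetD mdl s 0)

-- ===== PORT B =====
-- d = [0]*(e+1); for dv in range(1, e+1): for m in range(dv, e+1, dv): d[m] += 1
def solutionSieve (e : Int) : Array Int :=
  (PySem.List.pyRange 1 (e+1) 1).foldl
    (fun d dv =>
      (PySem.List.pyRange dv (e+1) dv).foldl
        (fun d m => aSetD d m (aGetD d m 0 + 1)) d)
    (PySem.List.pyRepeat [0] (e+1)).toArray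

-- max_div_list = [0]*(e+1); max_div_list[-1] = e; backward sweep (as in A)
def solutionSuffixB (e min_s : Int) (d : Array Int) : Array Int :=
  (PySem.List.pyRange (e-1) (min_s-1) (-1)).foldl
    (fun m i =>
      if aGetD d (aGetD m (i+1) 0) 0 ≤ aGetD d i 0
      then aSetD m i i
      else aSetD m i (aGetD m (i+1) 0))
    (aSetD (PySem.List.pyRepeat [0] (e+1)).toArray (-1) e)

def solution_alt (e : Int) (starts : List Int) : List Int :=
  match PySem.List.min? starts (fun x => x) with
  | none => []
  | some min_s =>
    let d := solutionSieve e
    let mdl := solutionSuffixB e min_s d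
    starts.map (fun s => aGetD mdl s 0)

-- ===== PRECONDITION & SPEC =====
-- Pre_ excludes exactly the inputs where Python A raises: empty starts (ValueError
-- from min), e < 0 (IndexError assigning max_div_list[-1] on an empty list), and a
-- start outside [-(e+1), e] (IndexError in the sweep or the final lookup).
def Pre_solution (e : Int) (starts : List Int) : Prop :=
  0 ≤ e ∧ starts ≠ [] ∧ ∀ s ∈ starts, -(e+1) ≤ s ∧ s ≤ e
instance (e : Int) (starts : List Int) : Decidable (Pre_solution e starts) := by unfold Pre_solution; infer_instance
def pvWitness_solution : Int × List Int := (8, [1, 3, 8, 0])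
def Spec_solution (e : Int) (starts : List Int) (out : List Int) : Prop := out = solution_alt e starts
instance (e : Int) (starts : List Int) (out : List Int) : Decidable (Spec_solution e starts out) := by unfold Spec_solution; infer_instance

-- ===== CLAIM (what is proved, stated in full; the proofs are below) =====
def Claim_equal_solution : Prop := ∀ (e : Int) (starts : List Int), Dom_solution e starts → Pre_solution e starts → Spec_solution e starts (solution e starts)

-- ===== LEMMAS AND PROOFS =====

-- list-level models of the two programs (proof side)
def lstInner (e i : Int) (d : List Int) : List Int → List Int
  | [] => d
  | j :: rest =>
    let ij := i * j
    if ij > e then d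
    else lstInner e i (PySem.List.pySetD d ij (PySem.List.pyGetD d ij 0 + 2)) rest

-- d = [0 for i in range(e+1)]; the double loop counting divisor pairs
def lstPhase1A (e : Int) : List Int :=
  (PySem.List.pyRange 1 (e+1) 1).foldl
    (fun d i =>
      let d' := if i*i ≤ e then PySem.List.pySetD d (i*i) (PySem.List.pyGetD d (i*i) 0 + 1) else d
      lstInner e i d' (PySem.List.pyRange (i+1) (e+1) 1))
    ((PySem.List.pyRange 0 (e+1) 1).map (fun _ => 0))

-- max_div_list = [0 for i in range(e+1)]; max_div_list[-1] = e; backward sweep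
def lstSuffixA (e min_s : Int) (d : List Int) : List Int :=
  (PySem.List.pyRange (e-1) (min_s-1) (-1)).foldl
    (fun m i =>
      if PySem.List.pyGetD d (PySem.List.pyGetD m (i+1) 0) 0 ≤ PySem.List.pyGetD d i 0
      then PySem.List.pySetD m i i
      else PySem.List.pySetD m i (PySem.List.pyGetD m (i+1) 0))
    (PySem.List.pySetD ((PySem.List.pyRange 0 (e+1) 1).map (fun _ => 0)) (-1) e)


-- d = [0]*(e+1); for dv in range(1, e+1): for m in range(dv, e+1, dv): d[m] += 1
def lstSieve (e : Int) : List Int :=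
  (PySem.List.pyRange 1 (e+1) 1).foldl
    (fun d dv =>
      (PySem.List.pyRange dv (e+1) dv).foldl
        (fun d m => PySem.List.pySetD d m (PySem.List.pyGetD d m 0 + 1)) d)
    (PySem.List.pyRepeat [0] (e+1))

-- max_div_list = [0]*(e+1); max_div_list[-1] = e; backward sweep (as in A)
def lstSuffixB (e min_s : Int) (d : List Int) : List Int :=
  (PySem.List.pyRange (e-1) (min_s-1) (-1)).foldl
    (fun m i =>
      if PySem.List.pyGetD d (PySem.List.pyGetD m (i+1) 0) 0 ≤ PySem.List.pyGetD d i 0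
      then PySem.List.pySetD m i i
      else PySem.List.pySetD m i (PySem.List.pyGetD m (i+1) 0))
    (PySem.List.pySetD (PySem.List.pyRepeat [0] (e+1)) (-1) e)


-- one '+=' update, as a (index, amount) pair
def bumpP (d : List Int) (p : Int × Int) : List Int :=
  PySem.List.pySetD d p.1 (PySem.List.pyGetD d p.1 0 + p.2)

-- increments contributed by iteration i of A's outer loop
def blkA (e i : Int) : List (Int × Int) :=
  (if i*i ≤ e then [(i*i, (1:Int))] else []) ++
  ((PySem.List.pyRange (i+1) (e+1) 1).takeWhile (fun j => decide (i*j ≤ e))).map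
    (fun j => (i*j, (2:Int)))

-- increments contributed by iteration dv of B's outer loop
def blkB (e dv : Int) : List (Int × Int) :=
  (PySem.List.pyRange dv (e+1) dv).map (fun m => (m, (1:Int)))

lemma length_foldl_bumpP (L : List (Int × Int)) (arr : List Int) :
    (L.foldl bumpP arr).length = arr.length := by
  induction L generalizing arr with
  | nil => rfl
  | cons p L ih => simp [List.foldl_cons, ih, bumpP, PySem.List.length_pySetD]

lemma getD_foldl_bumpP (L : List (Int × Int)) (arr : List Int)
    (hL : ∀ p ∈ L, 0 ≤ p.1 ∧ p.1 < (arr.length : Int)) (n : ℕ) :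
    (L.foldl bumpP arr).getD n 0
      = arr.getD n 0 + ((L.filter (fun p => p.1 == (n : Int))).map (·.2)).sum := by
  induction L generalizing arr with
  | nil => simp
  | cons p L ih =>
    obtain ⟨hp0, hp1⟩ := hL p (by simp)
    have hlen : (bumpP arr p).length = arr.length := by
      simp [bumpP, PySem.List.length_pySetD]
    have hL' : ∀ q ∈ L, 0 ≤ q.1 ∧ q.1 < ((bumpP arr p).length : Int) := by
      intro q hq; rw [hlen]; exact hL q (by simp [hq])
    rw [List.foldl_cons, ih _ hL']
    have hset : bumpP arr p = arr.set p.1.toNat (arr.getD p.1.toNat 0 + p.2) := by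
      simp [bumpP, PySem.List.pySetD_of_nonneg _ _ hp0, PySem.List.pyGetD_of_nonneg _ _ hp0]
    by_cases hpn : p.1 = (n : Int)
    · have hnl : n < arr.length := by omega
      have htn : p.1.toNat = n := by omega
      have : (bumpP arr p).getD n 0 = arr.getD n 0 + p.2 := by
        rw [hset, htn, List.getD_eq_getElem?_getD, List.getElem?_set_self hnl]
        rfl
      rw [this, List.filter_cons_of_pos (by simp [hpn])]
      simp [add_assoc]
    · have : (bumpP arr p).getD n 0 = arr.getD n 0 := by
        rw [hset, List.getD_eq_getElem?_getD, List.getElem?_set_ne (by omega),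
            ← List.getD_eq_getElem?_getD]
      rw [this, List.filter_cons_of_neg (by simp [hpn])]

lemma nodup_pyRange_pos (a b s : Int) (hs : 0 < s) : (PySem.List.pyRange a b s).Nodup := by
  rw [PySem.List.pyRange_of_pos a b hs]
  refine List.Nodup.map ?_ List.nodup_range
  intro x y h
  have h2 : s * (x:Int) = s * y := by
    have := add_left_cancel h
    exact this
  have := mul_left_cancel₀ (by omega : (s:Int) ≠ 0) h2
  exact_mod_cast this

lemma takeWhile_eq_filter_antitone (l : List Int) (p : Int → Bool)
    (hs : l.Pairwise (· < ·)) (hp : ∀ a b : Int, a ≤ b → p b = true → p a = true) :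
    l.takeWhile p = l.filter p := by
  induction l with
  | nil => rfl
  | cons x t ih =>
    rw [List.pairwise_cons] at hs
    obtain ⟨hx, ht⟩ := hs
    by_cases hpx : p x = true
    · simp [hpx, ih ht]
    · have : t.filter p = [] := by
        refine List.filter_eq_nil_iff.mpr fun a ha hpa => ?_
        exact hpx (hp x a (le_of_lt (hx a ha)) hpa)
      simp [hpx, this]

lemma innerA_eq_foldl (e i : Int) (js : List Int) (d : List Int) :
    lstInner e i d js
      = ((js.takeWhile (fun j => decide (i*j ≤ e))).map (fun j => (i*j, (2:Int)))).foldl bumpP d := by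
  induction js generalizing d with
  | nil => rfl
  | cons j rest ih =>
    by_cases h : i * j > e
    · simp [lstInner, by omega]
    · have hle : i * j ≤ e := by omega
      simp only [lstInner, List.takeWhile_cons, hle, if_pos,
        decide_true, List.map_cons, List.foldl_cons, if_neg h]
      exact ih _

lemma phase1A_eq_flat (e : Int) :
    lstPhase1A e
      = ((PySem.List.pyRange 1 (e+1) 1).flatMap (blkA e)).foldl bumpP
          ((PySem.List.pyRange 0 (e+1) 1).map (fun _ => 0)) := by
  rw [List.foldl_flatMap, lstPhase1A]
  apply PySem.List.foldl_congr_mem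
  intro d i _
  rw [blkA, List.foldl_append, innerA_eq_foldl]
  by_cases h : i*i ≤ e <;> simp [h, bumpP]

lemma sieve_eq_flat (e : Int) :
    lstSieve e
      = ((PySem.List.pyRange 1 (e+1) 1).flatMap (blkB e)).foldl bumpP
          (PySem.List.pyRepeat [0] (e+1)) := by
  rw [List.foldl_flatMap, lstSieve]
  apply PySem.List.foldl_congr_mem
  intro d dv _
  rw [blkB, List.foldl_map]
  rfl

lemma arr0A_eq (e : Int) :
    (PySem.List.pyRange 0 (e+1) 1).map (fun _ => (0:Int)) = List.replicate (e+1).toNat 0 := by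
  rw [List.map_const']
  simp [PySem.List.length_pyRange_one]

lemma arr0B_eq (e : Int) :
    PySem.List.pyRepeat [(0:Int)] (e+1) = List.replicate (e+1).toNat 0 := by
  simp [PySem.List.pyRepeat_singleton]

lemma blkA_bounds (e i : Int) (hi : 1 ≤ i) :
    ∀ p ∈ blkA e i, 0 ≤ p.1 ∧ p.1 < e + 1 := by
  intro p hp
  rw [blkA, List.mem_append] at hp
  rcases hp with hp | hp
  · by_cases h : i*i ≤ e
    · rw [if_pos h, List.mem_singleton] at hp
      subst hp
      constructor
      · positivity
      · simpa using by omega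
    · simp [if_neg h] at hp
  · obtain ⟨j, hj, rfl⟩ := List.mem_map.mp hp
    have hj1 := List.Sublist.mem hj (List.takeWhile_sublist _)
    have hj2 : (decide (i*j ≤ e)) = true := List.mem_takeWhile_imp (p := fun j => decide (i*j ≤ e)) hj
    rw [PySem.List.mem_pyRange_one] at hj1
    simp only [decide_eq_true_eq] at hj2
    exact ⟨mul_nonneg (by omega) (by omega), by omega⟩

lemma blkB_bounds (e dv : Int) (hdv : 1 ≤ dv) :
    ∀ p ∈ blkB e dv, 0 ≤ p.1 ∧ p.1 < e + 1 := by
  intro p hp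
  obtain ⟨m, hm, rfl⟩ := List.mem_map.mp hp
  rw [PySem.List.mem_pyRange_iff_of_pos (by omega)] at hm
  exact ⟨by omega, by omega⟩

lemma blkA_sum (e i : Int) (n : ℕ) (hi : 1 ≤ i) (hn : (n : Int) ≤ e) :
    (((blkA e i).filter (fun p => p.1 == (n : Int))).map (·.2)).sum
      = (if i*i = (n:Int) then 1 else 0)
        + (if (i ∣ (n:Int) ∧ i*i < (n:Int)) then 2 else 0) := by
  rw [blkA, List.filter_append, List.map_append, List.sum_append]
  have hsq : (((if i*i ≤ e then [(i*i,(1:Int))] else []).filter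
      (fun p => p.1 == (n:Int))).map (·.2)).sum = if i*i = (n:Int) then 1 else 0 := by
    by_cases h : i*i ≤ e
    · by_cases h2 : i*i = (n:Int) <;> simp [h, h2, hn]
    · have h3 : i*i ≠ (n:Int) := fun hc => h (hc ▸ hn)
      simp [h, h3]
  rw [hsq]
  congr 1
  rw [takeWhile_eq_filter_antitone _ _ (PySem.List.pairwise_lt_pyRange_one _ _)
    (by
      intro a b hab hb
      simp only [decide_eq_true_eq] at hb ⊢
      calc i*a ≤ i*b := by exact mul_le_mul_of_nonneg_left hab (by omega)
        _ ≤ e := hb)]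
  rw [List.filter_map, List.map_map]
  have h1 : ((fun (p : Int × Int) => p.2) ∘ (fun j => (i*j, (2:Int)))) = fun _ => (2:Int) := rfl
  have h2 : ((fun (p : Int × Int) => p.1 == (n:Int)) ∘ (fun j => (i*j, (2:Int))))
      = fun j => i*j == (n:Int) := rfl
  rw [h1, h2, PySem.List.sum_map_const_int, List.filter_filter]
  rw [List.filter_congr (q := fun j => i*j == (n:Int)) (by
    intro j _
    by_cases hj : i*j = (n:Int)
    · simp [hj, hn]
    · simp [hj])]
  rw [List.countP_eq_length_filter.symm]
  by_cases hd : i ∣ (n:Int)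
  · obtain ⟨c, hc⟩ := hd
    have hc0 : 0 ≤ c := by nlinarith [Int.natCast_nonneg n]
    have hcount : (PySem.List.pyRange (i+1) (e+1) 1).countP (fun j => i*j == (n:Int))
        = (PySem.List.pyRange (i+1) (e+1) 1).count c := by
      apply List.countP_congr
      intro j _
      constructor
      · intro hj
        simp only [beq_iff_eq] at hj ⊢
        exact mul_left_cancel₀ (by omega : i ≠ 0) (by omega : i*j = i*c)
      · intro hj
        simp only [beq_iff_eq] at hj ⊢
        subst hj
        omega
    rw [hcount]
    have hmem : c ∈ PySem.List.pyRange (i+1) (e+1) 1 ↔ i*i < (n:Int) := by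
      rw [PySem.List.mem_pyRange_one]
      constructor
      · rintro ⟨hl, _⟩
        calc i*i < i*c := by apply mul_lt_mul_of_pos_left (by omega) (by omega)
          _ = (n:Int) := hc.symm
      · intro hlt
        have hic : i < c := by
          by_contra hcon
          have : i*c ≤ i*i := mul_le_mul_of_nonneg_left (by omega) (by omega)
          omega
        have hce : c ≤ (n:Int) := by nlinarith
        exact ⟨by omega, by omega⟩
    by_cases hlt : i*i < (n:Int)
    · rw [List.count_eq_one_of_mem (PySem.List.nodup_pyRange_one _ _) (hmem.mpr hlt)]
      rw [if_pos ⟨⟨c, hc⟩, hlt⟩]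
      simp
    · rw [List.count_eq_zero.mpr (fun hm => hlt (hmem.mp hm))]
      rw [if_neg (fun h => hlt h.2)]
      simp
  · have : (PySem.List.pyRange (i+1) (e+1) 1).countP (fun j => i*j == (n:Int)) = 0 := by
      rw [List.countP_eq_zero]
      intro j _ hj
      simp only [beq_iff_eq] at hj
      exact hd ⟨j, hj.symm⟩
    rw [this, if_neg (fun h => hd h.1)]
    simp

lemma blkB_sum (e dv : Int) (n : ℕ) (hdv : 1 ≤ dv) (hn : (n : Int) ≤ e) :
    (((blkB e dv).filter (fun p => p.1 == (n : Int))).map (·.2)).sum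
      = (if (dv ∣ (n:Int) ∧ dv ≤ (n:Int)) then 1 else 0) := by
  rw [blkB, List.filter_map, List.map_map]
  have h1 : ((fun (p : Int × Int) => p.2) ∘ (fun m => (m, (1:Int)))) = fun _ => (1:Int) := rfl
  rw [h1, PySem.List.sum_map_const_int]
  have h2 : ((fun (p : Int × Int) => p.1 == (n:Int)) ∘ (fun m => (m, (1:Int)))) = fun m => m == (n:Int) := rfl
  rw [h2, List.countP_eq_length_filter.symm]
  have h3 : (PySem.List.pyRange dv (e+1) dv).countP (fun m => m == (n:Int))
      = (PySem.List.pyRange dv (e+1) dv).count ((n:Int)) := rfl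
  rw [h3]
  by_cases hmem : (n : Int) ∈ PySem.List.pyRange dv (e+1) dv
  · rw [List.count_eq_one_of_mem (nodup_pyRange_pos _ _ _ (by omega)) hmem]
    rw [PySem.List.mem_pyRange_iff_of_pos (by omega)] at hmem
    rw [if_pos ⟨by
      have := dvd_add hmem.2.2 (dvd_refl dv)
      simpa using this, hmem.1⟩]
    simp
  · rw [List.count_eq_zero.mpr hmem]
    rw [PySem.List.mem_pyRange_iff_of_pos (by omega)] at hmem
    push Not at hmem
    rw [if_neg ?_]
    · simp
    · rintro ⟨hd, hle⟩
      exact hmem hle (by omega) (dvd_sub hd (dvd_refl dv))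

lemma icc_range (M : ℕ) (g : ℕ → ℤ) : ∑ i ∈ Finset.Icc 1 M, g i = ∑ k ∈ Finset.range M, g (k+1) := by
  rw [← Finset.Ico_add_one_right_eq_Icc, Finset.sum_Ico_eq_sum_range]
  simp [add_comm]

lemma card_divisor_pairing (M m : ℕ) (hm : 1 ≤ m) (hM : m ≤ M) :
    ((Finset.Icc 1 M).filter (fun i => i*i = m)).card
      + 2 * ((Finset.Icc 1 M).filter (fun i => i ∣ m ∧ i*i < m)).card
      = ((Finset.Icc 1 M).filter (fun i => i ∣ m ∧ i ≤ m)).card := by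
  have hm0 : m ≠ 0 := by omega
  have h1 : (Finset.Icc 1 M).filter (fun i => i ∣ m ∧ i ≤ m) = m.divisors := by
    ext i
    simp only [Finset.mem_filter, Finset.mem_Icc, Nat.mem_divisors]
    constructor
    · rintro ⟨_, hd, _⟩; exact ⟨hd, hm0⟩
    · rintro ⟨hd, _⟩
      have hi1 : 0 < i := Nat.pos_of_dvd_of_pos hd (by omega)
      have him : i ≤ m := Nat.le_of_dvd (by omega) hd
      exact ⟨⟨hi1, by omega⟩, hd, him⟩
  have h2 : (Finset.Icc 1 M).filter (fun i => i ∣ m ∧ i*i < m)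
      = m.divisors.filter (fun i => i*i < m) := by
    ext i
    simp only [Finset.mem_filter, Finset.mem_Icc, Nat.mem_divisors]
    constructor
    · rintro ⟨_, hd, hlt⟩; exact ⟨⟨hd, hm0⟩, hlt⟩
    · rintro ⟨⟨hd, _⟩, hlt⟩
      have hi1 : 0 < i := Nat.pos_of_dvd_of_pos hd (by omega)
      have him : i ≤ m := Nat.le_of_dvd (by omega) hd
      exact ⟨⟨hi1, by omega⟩, hd, hlt⟩
  have h3 : (Finset.Icc 1 M).filter (fun i => i*i = m)
      = m.divisors.filter (fun i => i*i = m) := by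
    ext i
    simp only [Finset.mem_filter, Finset.mem_Icc, Nat.mem_divisors]
    constructor
    · rintro ⟨_, hsq⟩; exact ⟨⟨⟨i, hsq.symm⟩, hm0⟩, hsq⟩
    · rintro ⟨⟨_, _⟩, hsq⟩
      have hi1 : 0 < i := by nlinarith
      refine ⟨⟨hi1, ?_⟩, hsq⟩
      calc i ≤ i*i := Nat.le_mul_of_pos_left i hi1
        _ = m := hsq
        _ ≤ M := hM
  rw [h1, h2, h3]
  -- partition divisors by comparing i*i with m
  have hpart1 := Finset.card_filter_add_card_filter_not (s := m.divisors) (fun i => i*i < m)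
  have hpart2 := Finset.card_filter_add_card_filter_not
    (s := m.divisors.filter (fun i => ¬ i*i < m)) (fun i => i*i = m)
  have he1 : (m.divisors.filter (fun i => ¬ i*i < m)).filter (fun i => i*i = m)
      = m.divisors.filter (fun i => i*i = m) := by
    rw [Finset.filter_filter]
    apply Finset.filter_congr
    intro i _
    constructor
    · rintro ⟨_, h⟩; exact h
    · intro h; exact ⟨by omega, h⟩
  have he2 : (m.divisors.filter (fun i => ¬ i*i < m)).filter (fun i => ¬ i*i = m)
      = m.divisors.filter (fun i => m < i*i) := by
    rw [Finset.filter_filter]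
    apply Finset.filter_congr
    intro i _
    constructor
    · rintro ⟨h1', h2'⟩; omega
    · intro h; exact ⟨by omega, by omega⟩
  -- the two strict halves have equal size, via i ↦ m / i
  have hbij : (m.divisors.filter (fun i => i*i < m)).card
      = (m.divisors.filter (fun i => m < i*i)).card := by
    apply Finset.card_nbij' (fun i => m / i) (fun j => m / j)
    · intro i hi
      simp only [Finset.coe_filter, Set.mem_setOf_eq, Nat.mem_divisors] at hi ⊢
      obtain ⟨⟨hd, _⟩, hlt⟩ := hi
      have hi1 : 0 < i := Nat.pos_of_dvd_of_pos hd (by omega)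
      have hik : i * (m / i) = m := Nat.mul_div_cancel' hd
      have hklt : i < m / i := Nat.lt_of_mul_lt_mul_left (a := i) (by omega)
      refine ⟨⟨Nat.div_dvd_of_dvd hd, hm0⟩, ?_⟩
      calc m = i * (m / i) := hik.symm
        _ < (m/i) * (m/i) := by
            exact Nat.mul_lt_mul_of_lt_of_le hklt (le_refl _) (by omega)
    · intro j hj
      simp only [Finset.coe_filter, Set.mem_setOf_eq, Nat.mem_divisors] at hj ⊢
      obtain ⟨⟨hd, _⟩, hlt⟩ := hj
      have hj1 : 0 < j := Nat.pos_of_dvd_of_pos hd (by omega)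
      have hjk : j * (m / j) = m := Nat.mul_div_cancel' hd
      have hklt : m / j < j := by
        by_contra hcon
        have : j * j ≤ j * (m / j) := Nat.mul_le_mul_left j (by omega)
        omega
      refine ⟨⟨Nat.div_dvd_of_dvd hd, hm0⟩, ?_⟩
      have hq : 0 < m / j := Nat.div_pos (Nat.le_of_dvd (by omega) hd) hj1
      calc (m/j) * (m/j) < j * (m/j) := by
            exact Nat.mul_lt_mul_of_lt_of_le hklt (le_refl _) hq
        _ = m := hjk
    · intro i hi
      simp only [Finset.coe_filter, Set.mem_setOf_eq, Nat.mem_divisors] at hi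
      exact Nat.div_div_self hi.1.1 hm0
    · intro j hj
      simp only [Finset.coe_filter, Set.mem_setOf_eq, Nat.mem_divisors] at hj
      exact Nat.div_div_self hj.1.1 hm0
  rw [he1, he2] at hpart2
  omega

lemma key_sum (M m : ℕ) (hM : m ≤ M) :
    (∑ k ∈ Finset.range M, ((if (k+1)*(k+1) = m then (1:ℤ) else 0)
        + (if ((k+1) ∣ m ∧ (k+1)*(k+1) < m) then 2 else 0)))
      = ∑ k ∈ Finset.range M, (if ((k+1) ∣ m ∧ (k+1) ≤ m) then (1:ℤ) else 0) := by
  by_cases hm : m = 0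
  · subst hm
    refine Eq.trans (Finset.sum_eq_zero ?_) (Eq.symm (Finset.sum_eq_zero ?_))
    · intro k _
      rw [if_neg (by
        intro h
        have : 0 < (k+1)*(k+1) := Nat.mul_pos (by omega) (by omega)
        omega), if_neg (fun h => Nat.not_lt_zero _ h.2)]
      simp
    · intro k _
      rw [if_neg (by omega)]
  · have h2 : ∀ (p : Prop) [Decidable p], (if p then (2:ℤ) else 0) = 2 * (if p then 1 else 0) := by
      intro p _
      split_ifs <;> ring
    calc (∑ k ∈ Finset.range M, ((if (k+1)*(k+1) = m then (1:ℤ) else 0)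
        + (if ((k+1) ∣ m ∧ (k+1)*(k+1) < m) then 2 else 0)))
        = (∑ k ∈ Finset.range M, (if (k+1)*(k+1) = m then (1:ℤ) else 0))
          + 2 * ∑ k ∈ Finset.range M, (if ((k+1) ∣ m ∧ (k+1)*(k+1) < m) then (1:ℤ) else 0) := by
          rw [Finset.sum_add_distrib, Finset.mul_sum]
          congr 1
          exact Finset.sum_congr rfl (fun k _ => h2 _)
      _ = (∑ i ∈ Finset.Icc 1 M, (if i*i = m then (1:ℤ) else 0))
          + 2 * ∑ i ∈ Finset.Icc 1 M, (if (i ∣ m ∧ i*i < m) then (1:ℤ) else 0) := by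
          rw [icc_range M (fun i => if i*i = m then (1:ℤ) else 0),
              icc_range M (fun i => if (i ∣ m ∧ i*i < m) then (1:ℤ) else 0)]
      _ = (((Finset.Icc 1 M).filter (fun i => i*i = m)).card : ℤ)
          + 2 * ((Finset.Icc 1 M).filter (fun i => i ∣ m ∧ i*i < m)).card := by
          rw [Finset.sum_boole, Finset.sum_boole]
      _ = (((Finset.Icc 1 M).filter (fun i => i ∣ m ∧ i ≤ m)).card : ℤ) := by
          have := card_divisor_pairing M m (by omega) hM
          push_cast [← this]
          ring
      _ = ∑ i ∈ Finset.Icc 1 M, (if (i ∣ m ∧ i ≤ m) then (1:ℤ) else 0) := by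
          rw [Finset.sum_boole]
      _ = _ := icc_range M _

lemma sum_map_range_int (M : ℕ) (f : ℕ → ℤ) :
    ((List.range M).map f).sum = ∑ k ∈ Finset.range M, f k := rfl

lemma sum_flatMap_int (l : List Int) (h : Int → List Int) :
    (l.flatMap h).sum = (l.map (fun x => (h x).sum)).sum := by
  rw [List.flatMap_def, List.sum_flatten, List.map_map]; rfl

lemma d_eq (e : Int) : lstPhase1A e = lstSieve e := by
  rw [phase1A_eq_flat, sieve_eq_flat, arr0A_eq, arr0B_eq]
  set R := List.replicate (e+1).toNat (0:Int) with hR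
  have hRlen : R.length = (e+1).toNat := List.length_replicate
  have hbA : ∀ p ∈ (PySem.List.pyRange 1 (e+1) 1).flatMap (blkA e), 0 ≤ p.1 ∧ p.1 < (R.length : Int) := by
    intro p hp
    obtain ⟨i, hi, hpi⟩ := List.mem_flatMap.mp hp
    rw [PySem.List.mem_pyRange_one] at hi
    have := blkA_bounds e i hi.1 p hpi
    rw [hRlen]
    omega
  have hbB : ∀ p ∈ (PySem.List.pyRange 1 (e+1) 1).flatMap (blkB e), 0 ≤ p.1 ∧ p.1 < (R.length : Int) := by
    intro p hp
    obtain ⟨i, hi, hpi⟩ := List.mem_flatMap.mp hp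
    rw [PySem.List.mem_pyRange_one] at hi
    have := blkB_bounds e i hi.1 p hpi
    rw [hRlen]
    omega
  apply List.ext_getElem
  · rw [length_foldl_bumpP, length_foldl_bumpP]
  · intro k h1 h2
    rw [length_foldl_bumpP, hRlen] at h1
    rw [← List.getD_eq_getElem _ 0, ← List.getD_eq_getElem _ 0]
    rw [getD_foldl_bumpP _ _ hbA, getD_foldl_bumpP _ _ hbB]
    congr 1
    have hke : (k : Int) ≤ e := by omega
    -- push the filter/map/sum through the flatMap on both sides
    rw [List.filter_flatMap, List.map_flatMap, sum_flatMap_int,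
        List.filter_flatMap, List.map_flatMap, sum_flatMap_int]
    refine Eq.trans (congrArg List.sum (List.map_congr_left (l := PySem.List.pyRange 1 (e+1) 1)
      (g := fun i => (if i*i = (k:Int) then (1:ℤ) else 0)
        + (if (i ∣ (k:Int) ∧ i*i < (k:Int)) then 2 else 0)) ?_))
      (Eq.trans ?_ (congrArg List.sum (List.map_congr_left (l := PySem.List.pyRange 1 (e+1) 1)
      (g := fun dv => (if (dv ∣ (k:Int) ∧ dv ≤ (k:Int)) then (1:ℤ) else 0)) ?_)).symm)
    · intro i hi
      rw [PySem.List.mem_pyRange_one] at hi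
      exact blkA_sum e i k hi.1 hke
    · rw [PySem.List.pyRange_one, List.map_map, List.map_map,
          sum_map_range_int, sum_map_range_int]
      have hM : k ≤ (e+1-1).toNat := by omega
      have hkey : (∑ j ∈ Finset.range (e+1-1).toNat,
            ((if (1+j)*(1+j) = k then (1:ℤ) else 0)
              + (if ((1+j) ∣ k ∧ (1+j)*(1+j) < k) then 2 else 0)))
          = ∑ j ∈ Finset.range (e+1-1).toNat,
            (if ((1+j) ∣ k ∧ (1+j) ≤ k) then (1:ℤ) else 0) := by
        have h1 : ∀ j : ℕ, 1 + j = j + 1 := fun j => Nat.add_comm 1 j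
        simp only [h1]
        exact key_sum (e+1-1).toNat k hM
      have hA2 : (∑ j ∈ Finset.range (e+1-1).toNat,
            ((fun i => (if i*i = (k:Int) then (1:ℤ) else 0)
              + (if (i ∣ (k:Int) ∧ i*i < (k:Int)) then 2 else 0)) ∘ (fun j : ℕ => 1 + (j:Int))) j)
          = ∑ j ∈ Finset.range (e+1-1).toNat,
            ((if (1+j)*(1+j) = k then (1:ℤ) else 0)
              + (if ((1+j) ∣ k ∧ (1+j)*(1+j) < k) then 2 else 0)) := by
        refine Finset.sum_congr rfl (fun j _ => ?_)
        simp only [Function.comp]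
        congr 1
        · refine if_congr ⟨fun h => by exact_mod_cast h, fun h => by exact_mod_cast h⟩ rfl rfl
        · refine if_congr (and_congr
            ⟨fun h => by exact_mod_cast h, fun h => by exact_mod_cast h⟩
            ⟨fun h => by exact_mod_cast h, fun h => by exact_mod_cast h⟩) rfl rfl
      have hB2 : (∑ j ∈ Finset.range (e+1-1).toNat,
            ((fun dv => (if (dv ∣ (k:Int) ∧ dv ≤ (k:Int)) then (1:ℤ) else 0)) ∘ (fun j : ℕ => 1 + (j:Int))) j)
          = ∑ j ∈ Finset.range (e+1-1).toNat,
            (if ((1+j) ∣ k ∧ (1+j) ≤ k) then (1:ℤ) else 0) := by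
        refine Finset.sum_congr rfl (fun j _ => ?_)
        simp only [Function.comp]
        refine if_congr (and_congr
          ⟨fun h => by exact_mod_cast h, fun h => by exact_mod_cast h⟩
          ⟨fun h => by exact_mod_cast h, fun h => by exact_mod_cast h⟩) rfl rfl
      rw [hA2, hB2, hkey]
    · intro dv hdv
      rw [PySem.List.mem_pyRange_one] at hdv
      exact blkB_sum e dv k hdv.1 hke

-- ===== bridges: the Array ports compute the list models =====

lemma aGetD_toList (a : Array Int) (i d : Int) :
    aGetD a i d = PySem.List.pyGetD a.toList i d := by
  unfold aGetD
  simp only [PySem.List.pyGetD, PySem.List.pyGet?, Array.length_toList]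
  cases PySem.List.pyIdx? a.size i with
  | none => rfl
  | some k => simp [Array.getElem?_toList]

lemma aSetD_toList (a : Array Int) (i v : Int) :
    (aSetD a i v).toList = PySem.List.pySetD a.toList i v := by
  unfold aSetD
  simp only [PySem.List.pySetD, PySem.List.pySet?, Array.length_toList]
  cases PySem.List.pyIdx? a.size i with
  | none => rfl
  | some k => simp [Array.toList_setIfInBounds]

lemma foldl_toList {σ : Type} (l : List σ) (F : Array Int → σ → Array Int)
    (G : List Int → σ → List Int) (h : ∀ a x, (F a x).toList = G a.toList x) (a : Array Int) :
    (l.foldl F a).toList = l.foldl G a.toList := by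
  induction l generalizing a with
  | nil => rfl
  | cons x t ih => rw [List.foldl_cons, List.foldl_cons, ih, h]

lemma innerA_bridge (e i : Int) (d : Array Int) (j : Int) :
    (solutionInner e i d j).toList = lstInner e i d.toList (PySem.List.pyRange j (e+1) 1) := by
  have H : ∀ (n : ℕ) (j : Int) (d : Array Int), (e + 1 - j).toNat = n →
      (solutionInner e i d j).toList = lstInner e i d.toList (PySem.List.pyRange j (e+1) 1) := by
    intro n
    induction n with
    | zero =>
      intro j d hn
      rw [solutionInner, dif_neg (by omega), PySem.List.pyRange_one_eq_nil (by omega)]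
      rfl
    | succ n ih =>
      intro j d hn
      have hj : j < e + 1 := by omega
      rw [solutionInner, dif_pos hj, PySem.List.pyRange_one_cons hj]
      simp only [lstInner]
      by_cases hij : i * j > e
      · rw [if_pos hij, if_pos hij]
      · rw [if_neg hij, if_neg hij, ih (j+1) _ (by omega), aSetD_toList, aGetD_toList]
  exact H _ j d rfl

lemma phase1A_bridge (e : Int) : (solutionPhase1A e).toList = lstPhase1A e := by
  unfold solutionPhase1A lstPhase1A
  rw [foldl_toList _ _ _ (fun a x => ?_), List.toList_toArray]
  by_cases h : x*x ≤ e
  · rw [if_pos h, if_pos h, innerA_bridge, aSetD_toList, aGetD_toList]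
  · rw [if_neg h, if_neg h, innerA_bridge]

lemma sieve_bridge (e : Int) : (solutionSieve e).toList = lstSieve e := by
  unfold solutionSieve lstSieve
  rw [foldl_toList _ _ _ (fun a x => ?_), List.toList_toArray]
  rw [foldl_toList _ _ _ (fun a' x' => ?_)]
  rw [aSetD_toList, aGetD_toList]

lemma suffixA_bridge (e min_s : Int) (d : Array Int) :
    (solutionSuffixA e min_s d).toList = lstSuffixA e min_s d.toList := by
  unfold solutionSuffixA lstSuffixA
  rw [foldl_toList _ _ _ (fun a x => ?_), aSetD_toList, List.toList_toArray]
  rw [apply_ite Array.toList]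
  simp only [aSetD_toList, aGetD_toList]

lemma suffixB_bridge (e min_s : Int) (d : Array Int) :
    (solutionSuffixB e min_s d).toList = lstSuffixB e min_s d.toList := by
  unfold solutionSuffixB lstSuffixB
  rw [foldl_toList _ _ _ (fun a x => ?_), aSetD_toList, List.toList_toArray]
  rw [apply_ite Array.toList]
  simp only [aSetD_toList, aGetD_toList]

lemma suffix_eq (e min_s : Int) :
    lstSuffixA e min_s (lstPhase1A e) = lstSuffixB e min_s (lstSieve e) := by
  unfold lstSuffixA lstSuffixB
  rw [d_eq, arr0A_eq, arr0B_eq]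

lemma solution_eq (e : Int) (starts : List Int) : solution e starts = solution_alt e starts := by
  unfold solution solution_alt
  cases PySem.List.min? starts (fun x => x) with
  | none => rfl
  | some min_s =>
    simp only []
    have hAB : (solutionSuffixA e min_s (solutionPhase1A e)).toList
        = (solutionSuffixB e min_s (solutionSieve e)).toList := by
      rw [suffixA_bridge, suffixB_bridge, phase1A_bridge, sieve_bridge, suffix_eq]
    refine List.map_congr_left (fun s _ => ?_)
    rw [aGetD_toList, aGetD_toList, hAB]

-- ===== VERDICT (by name: the statement is the Claim_ definition above) =====
theorem solution_spec : Claim_equal_solution := by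
  intro e starts _ _
  unfold Spec_solution
  exact solution_eq e starts
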